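-- pv_equiv track=rewrite | github.com/mohammadsafdar-netizen/Accord-Model-Building | langgraph_impl/dashboard.py | get_latest_state
-- ===== SOURCE A (Python) =====
-- def get_latest_state(logs: list) -> dict:
--     """Extract latest state from logs."""
--     state = {
--         "current_agent": "N/A",
--         "current_phase": "N/A",
--         "submission_status": "N/A",
--         "quote_amount": None
--     }
--
--     for log in reversed(logs):
--         msg = log.get("message", "")
--         if "Routing to" in msg:
--             parts = msg.split("Routing to ")
--             if len(parts) > 1:
--                 state["current_agent"] = parts[1].split(":")[0].strip()
--                 break
--         if "NODE_ENTRY" in log.get("type", ""):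
--             state["current_agent"] = msg.replace("Entering ", "").replace(" Node", "")
--             break
--
--     for log in reversed(logs):
--         if "submission" in log.get("type", "").lower():
--             if "Quote Generated" in log.get("message", ""):
--                 state["submission_status"] = "Quoted"
--                 # Try to parse quote amount
--                 try:
--                     msg = log.get("message", "")
--                     if "$" in msg:
--                         state["quote_amount"] = msg.split("$")[1].strip()
--                 except:
--                     pass
--             break
--
--     return state
-- ===== SOURCE B (Python) =====
-- def get_latest_state(logs: list) -> dict:
--     """Extract latest state from logs: single forward pass keeping the last
--     matching log for each field, then a pure extraction step."""
--     agent_log = None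
--     sub_log = None
--     for log in logs:  # forward pass; the last hit wins (= first in reverse order)
--         msg = log.get("message", "")
--         typ = log.get("type", "")
--         if "Routing to " in msg or "NODE_ENTRY" in typ:
--             agent_log = log
--         if "submission" in typ.lower():
--             sub_log = log
--
--     agent = "N/A"
--     if agent_log is not None:
--         msg = agent_log.get("message", "")
--         if "Routing to " in msg:
--             agent = msg.split("Routing to ")[1].split(":")[0].strip()
--         else:
--             agent = msg.replace("Entering ", "").replace(" Node", "")
--
--     status, amount = "N/A", None
--     if sub_log is not None:
--         msg = sub_log.get("message", "")
--         if "Quote Generated" in msg: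
--             status = "Quoted"
--             if "$" in msg:
--                 amount = msg.split("$")[1].strip()
--
--     return {
--         "current_agent": agent,
--         "current_phase": "N/A",
--         "submission_status": status,
--         "quote_amount": amount,
--     }
-- ===== Notes on version B (the rewrite author's own statement) =====
-- stated objective: alternative
-- what changed: A's two early-exit scans over reversed(logs) with inline state mutation are replaced by ONE forward pass carrying two accumulators that keep the LAST agent-hit and last submission-hit log (last-in-forward = first-in-reverse), followed by a separate pure extraction step building the dict in a single literal.
import Mathlib
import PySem

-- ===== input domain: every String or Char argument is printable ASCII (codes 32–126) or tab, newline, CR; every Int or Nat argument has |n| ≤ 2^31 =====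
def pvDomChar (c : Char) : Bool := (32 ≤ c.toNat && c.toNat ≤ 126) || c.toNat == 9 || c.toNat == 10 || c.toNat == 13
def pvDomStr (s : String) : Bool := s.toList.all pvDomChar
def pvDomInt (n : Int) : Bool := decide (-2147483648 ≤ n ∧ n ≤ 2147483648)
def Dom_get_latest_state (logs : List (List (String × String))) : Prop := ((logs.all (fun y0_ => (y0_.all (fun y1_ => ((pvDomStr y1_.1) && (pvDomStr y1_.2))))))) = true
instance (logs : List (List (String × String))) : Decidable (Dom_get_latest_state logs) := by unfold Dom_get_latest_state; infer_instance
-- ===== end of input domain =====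

-- B replaces A's two early-exit reverse scans by ONE forward fold keeping the last matching
-- log per field, then a separate pure extraction step (objective: alternative; same cost).

-- ===== PORT A =====
-- log.get(key, dflt) on the association list (first match)
def pvGetD (log : List (String × String)) (k dflt : String) : String :=
  match log.find? (fun p => p.1 == k) with
  | some p => p.2
  | none => dflt

-- A's first `for log in reversed(logs)` loop; `some a` = the loop broke after `state["current_agent"] = a`
def glsAgentLoop : List (List (String × String)) → Option String
  | [] => none
  | log :: rest =>
    let msg := pvGetD log "message" ""
    let routed : Option String :=
      if PySem.Str.isIn "Routing to" msg then
        let parts := (PySem.Str.split? msg "Routing to ").getD []   -- separator nonempty: never none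
        if parts.length > 1 then
          some (PySem.Str.strip (((PySem.Str.split? (parts.getD 1 "") ":").getD []).getD 0 ""))
        else none
      else none
    match routed with
    | some a => some a
    | none =>
      if PySem.Str.isIn "NODE_ENTRY" (pvGetD log "type" "") then
        some (PySem.Str.replace (PySem.Str.replace msg "Entering " "") " Node" "")
      else glsAgentLoop rest

-- A's second loop; outer `some` = broke on a submission log, inner `some (st, amt)` = the
-- "Quote Generated" branch ran (amt = the parsed amount if '$' was present)
def glsSubLoop : List (List (String × String)) → Option (Option (String × Option String))
  | [] => none
  | log :: rest =>
    if PySem.Str.isIn "submission" (PySem.Str.lower (pvGetD log "type" "")) then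
      if PySem.Str.isIn "Quote Generated" (pvGetD log "message" "") then
        let msg := pvGetD log "message" ""
        some (some ("Quoted",
          if PySem.Str.isIn "$" msg then
            some (PySem.Str.strip (((PySem.Str.split? msg "$").getD []).getD 1 ""))
          else none))
      else some none
    else glsSubLoop rest

def get_latest_state (logs : List (List (String × String))) : List (String × Option String) :=
  let state : PySem.Dict String (Option String) :=
    PySem.Dict.ofList [("current_agent", some "N/A"), ("current_phase", some "N/A"),
                       ("submission_status", some "N/A"), ("quote_amount", none)]
  let state :=
    match glsAgentLoop logs.reverse with
    | some a => state.insert "current_agent" (some a)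
    | none => state
  let state :=
    match glsSubLoop logs.reverse with
    | some (some (st, amt)) =>
      let state := state.insert "submission_status" (some st)
      match amt with
      | some a => state.insert "quote_amount" (some a)
      | none => state
    | _ => state
  state.items

-- ===== PORT B =====
def glsAgentHit (log : List (String × String)) : Bool :=
  PySem.Str.isIn "Routing to " (pvGetD log "message" "") ||
  PySem.Str.isIn "NODE_ENTRY" (pvGetD log "type" "")

def glsSubHit (log : List (String × String)) : Bool :=
  PySem.Str.isIn "submission" (PySem.Str.lower (pvGetD log "type" ""))

-- B's single forward pass: overwrite accumulators, so each holds the LAST hit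
def glsLastHits (logs : List (List (String × String))) :
    Option (List (String × String)) × Option (List (String × String)) :=
  logs.foldl (fun acc log =>
    (if glsAgentHit log then some log else acc.1,
     if glsSubHit log then some log else acc.2)) (none, none)

def get_latest_state_alt (logs : List (List (String × String))) : List (String × Option String) :=
  let hits := glsLastHits logs
  let agent := match hits.1 with
    | some log =>
      let msg := pvGetD log "message" ""
      if PySem.Str.isIn "Routing to " msg then
        PySem.Str.strip (((PySem.Str.split? ((((PySem.Str.split? msg "Routing to ").getD []).getD 1 "")) ":").getD []).getD 0 "")
      else
        PySem.Str.replace (PySem.Str.replace msg "Entering " "") " Node" ""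
    | none => "N/A"
  let sa : String × Option String :=
    match hits.2 with
    | some log =>
      let msg := pvGetD log "message" ""
      if PySem.Str.isIn "Quote Generated" msg then
        ("Quoted",
          if PySem.Str.isIn "$" msg then
            some (PySem.Str.strip (((PySem.Str.split? msg "$").getD []).getD 1 ""))
          else none)
      else ("N/A", none)
    | none => ("N/A", none)
  [("current_agent", some agent), ("current_phase", some "N/A"),
   ("submission_status", some sa.1), ("quote_amount", sa.2)]

-- ===== PRECONDITION & SPEC =====
def Spec_get_latest_state (logs : List (List (String × String))) (out : List (String × Option String)) : Prop := out = get_latest_state_alt logs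
instance (logs : List (List (String × String))) (out : List (String × Option String)) : Decidable (Spec_get_latest_state logs out) := by unfold Spec_get_latest_state; infer_instance

-- ===== CLAIM (what is proved, stated in full; the proofs are below) =====
def Claim_equal_get_latest_state : Prop := ∀ (logs : List (List (String × String))), Dom_get_latest_state logs → Spec_get_latest_state logs (get_latest_state logs)

-- ===== LEMMAS AND PROOFS =====

-- B's overwrite fold keeps the last hit = the first hit of the reversed list
theorem gls_lastHits_eq (logs : List (List (String × String))) :
    glsLastHits logs = (logs.reverse.find? glsAgentHit, logs.reverse.find? glsSubHit) := by
  suffices h : ∀ (l : List (List (String × String)))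
      (i : Option (List (String × String)) × Option (List (String × String))),
      l.foldl (fun acc log =>
        (if glsAgentHit log then some log else acc.1,
         if glsSubHit log then some log else acc.2)) i
        = ((l.reverse.find? glsAgentHit).or i.1, (l.reverse.find? glsSubHit).or i.2) by
    simpa [glsLastHits] using h logs (none, none)
  intro l
  induction l with
  | nil => intro i; simp
  | cons log rest ih =>
    intro i
    rw [List.foldl_cons, ih]
    rw [List.reverse_cons, List.find?_append, List.find?_append]
    cases ha : rest.reverse.find? glsAgentHit <;>
      cases hs : rest.reverse.find? glsSubHit <;>
        cases h1 : glsAgentHit log <;> cases h2 : glsSubHit log <;>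
          simp [List.find?, h1, h2]

-- splitOn.go always returns at least one more piece than were accumulated
theorem gls_go_length (sep : List Char) (fuel : Nat) (l cur : List Char) (acc : List (List Char)) :
    acc.length < (PySem.Chars.splitOn.go sep fuel l cur acc).length := by
  induction fuel generalizing l cur acc with
  | zero => simp [PySem.Chars.splitOn.go]
  | succ f ih =>
    cases l with
    | nil => simp [PySem.Chars.splitOn.go]
    | cons c rest =>
      rw [PySem.Chars.splitOn.go]
      split
      · exact Nat.lt_trans (by simp) (ih _ _ _)
      · exact ih _ _ _

-- when the separator does not occur, go just rebuilds the remaining text as one piece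
theorem gls_go_not_infix (sep : List Char) (fuel : Nat) (l cur : List Char) (acc : List (List Char))
    (h : ¬ sep <:+: l) :
    PySem.Chars.splitOn.go sep fuel l cur acc = ((cur.reverse ++ l) :: acc).reverse := by
  induction fuel generalizing l cur acc with
  | zero => simp [PySem.Chars.splitOn.go]
  | succ f ih =>
    cases l with
    | nil => simp [PySem.Chars.splitOn.go]
    | cons c rest =>
      rw [PySem.Chars.splitOn.go]
      have hpre : sep.isPrefixOf (c :: rest) = false := by
        cases hp : sep.isPrefixOf (c :: rest)
        · rfl
        · exact absurd (List.isPrefixOf_iff_prefix.mp hp).isInfix h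
      simp only [hpre]
      rw [ih rest (c :: cur) acc (fun hr => h (List.infix_cons_iff.mpr (Or.inr hr)))]
      simp

-- when the separator occurs and the fuel covers the text, go cuts at least once
theorem gls_go_infix_length (sep : List Char) (hsep : sep ≠ []) (fuel : Nat) :
    ∀ (l cur : List Char) (acc : List (List Char)), l.length < fuel → sep <:+: l →
    acc.length + 1 < (PySem.Chars.splitOn.go sep fuel l cur acc).length := by
  induction fuel with
  | zero => intro l cur acc h; omega
  | succ f ih =>
    intro l cur acc hlen hinf
    cases l with
    | nil =>
      exact absurd (List.eq_nil_of_infix_nil hinf) hsep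
    | cons c rest =>
      rw [PySem.Chars.splitOn.go]
      by_cases hp : sep.isPrefixOf (c :: rest) = true
      · rw [if_pos hp]
        have := gls_go_length sep f ((c :: rest).drop sep.length) [] (cur.reverse :: acc)
        simpa using this
      · rw [if_neg hp]
        have hr : sep <:+: rest := by
          rcases List.infix_cons_iff.mp hinf with h | h
          · exact absurd (List.isPrefixOf_iff_prefix.mpr h) hp
          · exact h
        exact ih rest (c :: cur) acc (by simp at hlen ⊢; omega) hr

-- msg.split(sep) has more than one piece exactly when sep occurs in msg (sep ≠ '')
theorem gls_splitOn_length (sep s : List Char) (hsep : sep ≠ []) :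
    1 < (PySem.Chars.splitOn s sep).length ↔ sep <:+: s := by
  constructor
  · intro h
    by_contra hni
    rw [PySem.Chars.splitOn, gls_go_not_infix sep _ s [] [] hni] at h
    simp at h
  · intro h
    have := gls_go_infix_length sep hsep (s.length + 1) s [] [] (by omega) h
    simpa [PySem.Chars.splitOn] using this

-- 'Routing to ' in msg implies 'Routing to' in msg
theorem gls_routing_mono (msg : String) (h : PySem.Str.isIn "Routing to " msg = true) :
    PySem.Str.isIn "Routing to" msg = true := by
  rw [PySem.Str.isIn_eq, PySem.Chars.isIn_iff_infix] at h ⊢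
  refine List.IsInfix.trans ?_ h
  exact (show ("Routing to").toList <+: ("Routing to ").toList by decide).isInfix

-- msg.split("Routing to ") has a second piece exactly when 'Routing to ' is in msg
theorem gls_parts_length (msg : String) :
    1 < ((PySem.Str.split? msg "Routing to ").getD []).length ↔
      PySem.Str.isIn "Routing to " msg = true := by
  rw [PySem.Str.isIn_eq, PySem.Chars.isIn_iff_infix, PySem.Str.split?, PySem.Chars.split?]
  simp only [show (("Routing to ").toList.isEmpty = false) from by decide, Bool.false_eq_true,
    if_false, Option.map_some, Option.getD_some, List.length_map]
  refine gls_splitOn_length _ _ ?_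
  decide

-- A's first loop is find?-then-extract over the reversed list
theorem gls_agentLoop_eq (l : List (List (String × String))) :
    glsAgentLoop l = (l.find? glsAgentHit).map (fun log =>
      let msg := pvGetD log "message" ""
      if PySem.Str.isIn "Routing to " msg then
        PySem.Str.strip (((PySem.Str.split? ((((PySem.Str.split? msg "Routing to ").getD []).getD 1 "")) ":").getD []).getD 0 "")
      else
        PySem.Str.replace (PySem.Str.replace msg "Entering " "") " Node" "") := by
  induction l with
  | nil => rfl
  | cons log rest ih =>
    rw [glsAgentLoop]
    cases hS : PySem.Str.isIn "Routing to " (pvGetD log "message" "") with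
    | true =>
      have hP : 1 < ((PySem.Str.split? (pvGetD log "message" "") "Routing to ").getD []).length :=
        (gls_parts_length _).mpr hS
      have hR := gls_routing_mono _ hS
      have hb : glsAgentHit log = true := by
        simp only [glsAgentHit, hS, Bool.true_or]
      rw [List.find?_cons_of_pos hb]
      simp only [hR, if_true, gt_iff_lt, if_pos hP, Option.map_some]
      simp only [PySem.Str.isIn_eq,
          show ("Routing to ").toList = ['R','o','u','t','i','n','g',' ','t','o',' '] from rfl] at hS
      simp [hS]
    | false =>
      have hnP : ¬ 1 < ((PySem.Str.split? (pvGetD log "message" "") "Routing to ").getD []).length := by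
        intro h
        have hx := (gls_parts_length _).mp h
        rw [hS] at hx
        exact Bool.noConfusion hx
      cases hN : PySem.Str.isIn "NODE_ENTRY" (pvGetD log "type" "") with
      | true =>
        have hb : glsAgentHit log = true := by
          simp only [glsAgentHit, hN, Bool.or_true]
        rw [List.find?_cons_of_pos hb]
        simp only [PySem.Str.isIn_eq,
          show ("Routing to ").toList = ['R','o','u','t','i','n','g',' ','t','o',' '] from rfl] at hS
        by_cases hR : PySem.Str.isIn "Routing to" (pvGetD log "message" "") = true
        · simp only [hR, if_true, gt_iff_lt, if_neg hnP, Option.map_some]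
          simp [hS]
        · simp only [Bool.not_eq_true] at hR
          simp only [hR, Bool.false_eq_true, if_false, if_true, Option.map_some]
          simp [hS]
      | false =>
        have hb : glsAgentHit log = false := by
          simp only [glsAgentHit, hS, hN, Bool.or_false]
        rw [List.find?_cons_of_neg (by simp [hb])]
        by_cases hR : PySem.Str.isIn "Routing to" (pvGetD log "message" "") = true
        · simp only [hR, if_true, gt_iff_lt, if_neg hnP, Bool.false_eq_true, if_false]
          exact ih
        · simp only [Bool.not_eq_true] at hR
          simp only [hR, Bool.false_eq_true, if_false]
          exact ih

-- A's second loop is find?-then-extract over the reversed list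
theorem gls_subLoop_eq (l : List (List (String × String))) :
    glsSubLoop l = (l.find? glsSubHit).map (fun log =>
      if PySem.Str.isIn "Quote Generated" (pvGetD log "message" "") then
        some ("Quoted",
          if PySem.Str.isIn "$" (pvGetD log "message" "") then
            some (PySem.Str.strip (((PySem.Str.split? (pvGetD log "message" "") "$").getD []).getD 1 ""))
          else none)
      else none) := by
  induction l with
  | nil => rfl
  | cons log rest ih =>
    rw [glsSubLoop]
    cases hb : glsSubHit log with
    | true =>
      have hb' : PySem.Str.isIn "submission" (PySem.Str.lower (pvGetD log "type" "")) = true := hb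
      rw [List.find?_cons_of_pos hb]
      by_cases hq : PySem.Str.isIn "Quote Generated" (pvGetD log "message" "") = true
      · simp only [hb', if_true, hq, Option.map_some]
      · simp only [Bool.not_eq_true] at hq
        simp only [hb', if_true, hq, Bool.false_eq_true, if_false, Option.map_some]
    | false =>
      have hb' : PySem.Str.isIn "submission" (PySem.Str.lower (pvGetD log "type" "")) = false := hb
      rw [List.find?_cons_of_neg (by simp [hb])]
      simp only [hb', Bool.false_eq_true, if_false]
      exact ih

-- ===== VERDICT (by name: the statement is the Claim_ definition above) =====
theorem get_latest_state_spec : Claim_equal_get_latest_state := by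
  intro logs _
  unfold Spec_get_latest_state
  unfold get_latest_state get_latest_state_alt
  rw [gls_agentLoop_eq, gls_subLoop_eq, gls_lastHits_eq]
  cases ha : (logs.reverse.find? glsAgentHit) with
  | none =>
    cases hs : (logs.reverse.find? glsSubHit) with
    | none => rfl
    | some log =>
      by_cases hq : PySem.Str.isIn "Quote Generated" (pvGetD log "message" "") = true
      · by_cases hd : PySem.Str.isIn "$" (pvGetD log "message" "") = true
        · simp only [Option.map_some, hq, if_true, hd]
          rfl
        · simp only [Bool.not_eq_true] at hd
          simp only [Option.map_some, hq, if_true, hd, Bool.false_eq_true, if_false]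
          rfl
      · simp only [Bool.not_eq_true] at hq
        simp only [Option.map_some, hq, Bool.false_eq_true, if_false]
        rfl
  | some alog =>
    cases hs : (logs.reverse.find? glsSubHit) with
    | none => rfl
    | some log =>
      by_cases hq : PySem.Str.isIn "Quote Generated" (pvGetD log "message" "") = true
      · by_cases hd : PySem.Str.isIn "$" (pvGetD log "message" "") = true
        · simp only [Option.map_some, hq, if_true, hd]
          rfl
        · simp only [Bool.not_eq_true] at hd
          simp only [Option.map_some, hq, if_true, hd, Bool.false_eq_true, if_false]
          rfl
      · simp only [Bool.not_eq_true] at hq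
        simp only [Option.map_some, hq, Bool.false_eq_true, if_false]
        rfl
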